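-- pv_equiv track=rewrite | github.com/kianschmalenbach/discrimination-2019 | src/app/frequent_rules.py | get_frequent_classification_rules
-- ===== SOURCE A (Python) =====
-- def get_frequent_classification_rules(rules, label):
--     to_remove = []
--     for rule in rules:
--         if rule[1][0] != label:
--             to_remove.append(rule)
--     for rule in to_remove:
--         rules.remove(rule)
--     return rules
-- ===== SOURCE B (Python) =====
-- def get_frequent_classification_rules(rules, label):
--     # Backward index scan deleting mismatches in place: same list object mutated & returned.
--     i = len(rules) - 1
--     while i >= 0:
--         if rules[i][1][0] != label:
--             del rules[i]
--         i -= 1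
--     return rules
-- ===== Notes on version B (the rewrite author's own statement) =====
-- stated objective: alternative
-- what changed: Replaces A's collect-then-repeated-list.remove two-phase pass with a single backward index loop that deletes mismatching rules in place (no auxiliary list, no value search), removing the quadratic remove-by-value phase.
import Mathlib
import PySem

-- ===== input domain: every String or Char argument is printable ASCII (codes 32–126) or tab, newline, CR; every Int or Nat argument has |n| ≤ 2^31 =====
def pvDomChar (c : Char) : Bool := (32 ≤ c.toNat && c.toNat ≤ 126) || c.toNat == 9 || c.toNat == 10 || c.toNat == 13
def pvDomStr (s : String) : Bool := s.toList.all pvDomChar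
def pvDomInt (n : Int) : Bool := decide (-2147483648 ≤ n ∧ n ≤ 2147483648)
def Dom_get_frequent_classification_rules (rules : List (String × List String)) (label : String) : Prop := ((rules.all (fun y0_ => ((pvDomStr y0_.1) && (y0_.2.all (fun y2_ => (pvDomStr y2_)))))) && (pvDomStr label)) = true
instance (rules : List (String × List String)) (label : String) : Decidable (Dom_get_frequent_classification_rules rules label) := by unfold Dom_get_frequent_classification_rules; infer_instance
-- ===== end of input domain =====

-- B replaces A's collect-then-repeated-list.remove pass with a single backward index
-- loop deleting mismatches in place; both A and B mutate `rules` in place and return the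
-- same object, so the return-value equivalence proved here also covers the side effect.

-- ===== PORT A =====
-- for rule in rules: if rule[1][0] != label: to_remove.append(rule)
-- for rule in to_remove: rules.remove(rule)   (remove? none = ValueError, outside Pre_ only)
def get_frequent_classification_rules (rules : List (String × List String)) (label : String) : List (String × List String) :=
  let to_remove := rules.foldl
    (fun acc rule => if PySem.List.pyGet? rule.2 0 ≠ some label then acc ++ [rule] else acc) []
  to_remove.foldl (fun acc rule => (PySem.List.remove? acc rule).getD acc) rules

-- ===== PORT B =====
-- while i >= 0: if rules[i][1][0] != label: del rules[i]; i -= 1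
-- recursion on i+1 (the number of remaining iterations); 'del rules[i]' is
-- rs.take i ++ rs.drop (i+1), exact for 0 ≤ i < len rs, which the loop guarantees;
-- the 'none' branch of pyGet? is unreachable there.
def pvGoB (label : String) : Nat → List (String × List String) → List (String × List String)
  | 0, rs => rs
  | i+1, rs =>
    match PySem.List.pyGet? rs (i : Int) with
    | some r =>
      if PySem.List.pyGet? r.2 0 ≠ some label then
        pvGoB label i (rs.take i ++ rs.drop (i+1))
      else
        pvGoB label i rs
    | none => pvGoB label i rs

def get_frequent_classification_rules_alt (rules : List (String × List String)) (label : String) : List (String × List String) :=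
  pvGoB label rules.length rules

-- ===== PRECONDITION & SPEC =====
-- Pre_ excludes exactly the inputs where rule[1][0] raises IndexError in both A and B:
-- a rule whose second component is the empty list.
def Pre_get_frequent_classification_rules (rules : List (String × List String)) (label : String) : Prop :=
  ∀ r ∈ rules, r.2 ≠ []
instance (rules : List (String × List String)) (label : String) : Decidable (Pre_get_frequent_classification_rules rules label) := by unfold Pre_get_frequent_classification_rules; infer_instance

def pvWitness_get_frequent_classification_rules : (List (String × List String)) × String :=
  ([("r1", ["x", "p"]), ("r2", ["y"]), ("r3", ["x"])], "x")

def Spec_get_frequent_classification_rules (rules : List (String × List String)) (label : String) (out : List (String × List String)) : Prop := out = get_frequent_classification_rules_alt rules label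
instance (rules : List (String × List String)) (label : String) (out : List (String × List String)) : Decidable (Spec_get_frequent_classification_rules rules label out) := by unfold Spec_get_frequent_classification_rules; infer_instance

-- ===== CLAIM =====
def Claim_equal_get_frequent_classification_rules : Prop := ∀ (rules : List (String × List String)) (label : String), Dom_get_frequent_classification_rules rules label → Pre_get_frequent_classification_rules rules label → Spec_get_frequent_classification_rules rules label (get_frequent_classification_rules rules label)

-- ===== LEMMAS AND PROOFS =====

-- removing elements ≠ a (all satisfying p, with p a = false) commutes with the head a
theorem pv_fold_remove_skip {α : Type} [BEq α] [LawfulBEq α] (p : α → Bool) (a : α) (ha : p a = false) :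
    ∀ (ts : List α), (∀ x ∈ ts, p x = true) → ∀ (l : List α),
      ts.foldl (fun acc r => (PySem.List.remove? acc r).getD acc) (a :: l)
        = a :: ts.foldl (fun acc r => (PySem.List.remove? acc r).getD acc) l := by
  intro ts
  induction ts with
  | nil => intro _ l; simp
  | cons x xs ih =>
    intro h l
    have hx : p x = true := h x (by simp)
    have hne : a ≠ x := by intro he; rw [he, hx] at ha; cases ha
    have hstep : (PySem.List.remove? (a :: l) x).getD (a :: l)
        = a :: (PySem.List.remove? l x).getD l := by
      rw [PySem.List.remove?_cons_of_ne l hne]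
      cases hrl : PySem.List.remove? l x <;> simp
    simp only [List.foldl_cons, hstep]
    exact ih (fun y hy => h y (by simp [hy])) _

-- folding remove over (l.filter p) starting from l yields l.filter (!p ·)
theorem pv_fold_remove_filter {α : Type} [BEq α] [LawfulBEq α] (p : α → Bool) :
    ∀ (l : List α),
      (l.filter p).foldl (fun acc r => (PySem.List.remove? acc r).getD acc) l
        = l.filter (fun x => !p x) := by
  intro l
  induction l with
  | nil => simp
  | cons a t ih =>
    by_cases ha : p a = true
    · simp only [List.filter_cons, ha, if_pos, List.foldl_cons,
        PySem.List.remove?_cons_self, Option.getD_some]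
      simpa using ih
    · have ha' : p a = false := by simpa using ha
      have hall : ∀ x ∈ t.filter p, p x = true := by
        intro x hx; exact (List.mem_filter.mp hx).2
      simp only [List.filter_cons, ha', if_neg, Bool.false_eq_true, not_false_iff]
      rw [pv_fold_remove_skip p a ha' (t.filter p) hall t, ih]
      simp

-- A computes rules.filter (rule[1][0] == label)
theorem pv_A_eq_filter (rules : List (String × List String)) (label : String) :
    get_frequent_classification_rules rules label
      = rules.filter (fun x => decide (PySem.List.pyGet? x.2 0 = some label)) := by
  unfold get_frequent_classification_rules
  rw [PySem.List.foldl_append_ite_eq_filter]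
  simp only [List.nil_append]
  have := pv_fold_remove_filter
    (fun rule : String × List String => decide (PySem.List.pyGet? rule.2 0 ≠ some label)) rules
  rw [this]
  congr 1
  funext x
  by_cases h : PySem.List.pyGet? x.2 0 = some label <;> simp [h]

-- loop invariant: with i iterations left, the prefix < i is untouched and the
-- suffix ≥ i is only ever filtered after being processed
theorem pv_goB_spec (label : String) :
    ∀ (i : Nat) (rs : List (String × List String)), i ≤ rs.length →
      pvGoB label i rs
        = (rs.take i).filter (fun x => decide (PySem.List.pyGet? x.2 0 = some label))
            ++ rs.drop i := by
  intro i
  induction i with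
  | zero => intro rs _; simp [pvGoB]
  | succ i ih =>
    intro rs hle
    have hi : i < rs.length := by omega
    have hget : PySem.List.pyGet? rs (i : Int) = some rs[i] :=
      PySem.List.pyGet?_ofNat rs i hi
    have htake : rs.take (i+1)
        = rs.take i ++ [rs[i]] := by
      rw [List.take_add_one]; simp [List.getElem?_eq_getElem hi]
    have hdrop : rs.drop i = rs[i] :: rs.drop (i+1) :=
      List.drop_eq_getElem_cons hi
    unfold pvGoB
    simp only [hget]
    by_cases hc : PySem.List.pyGet? (rs[i]).2 0 = some label
    · -- kept
      rw [if_neg (by simp [hc]), ih rs (by omega), htake, List.filter_append, hdrop]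
      simp [hc]
    · -- deleted
      have hlen : (rs.take i).length = i := by simp; omega
      have hle' : i ≤ (rs.take i ++ rs.drop (i+1)).length := by
        simp [hlen]
      have ht : (rs.take i ++ rs.drop (i+1)).take i = rs.take i := by
        rw [List.take_append_of_le_length (by omega), List.take_take]
        simp
      have hd : (rs.take i ++ rs.drop (i+1)).drop i = rs.drop (i+1) := by
        rw [List.drop_append_of_le_length (by omega)]
        simp
      rw [if_pos hc, ih _ hle', ht, hd, htake, List.filter_append]
      simp [hc]

-- ===== VERDICT =====
theorem get_frequent_classification_rules_spec : Claim_equal_get_frequent_classification_rules := by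
  intro rules label _ _
  unfold Spec_get_frequent_classification_rules get_frequent_classification_rules_alt
  rw [pv_A_eq_filter, pv_goB_spec label rules.length rules le_rfl]
  simp
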